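-- pv_equiv track=rewrite | github.com/DAI-Lab/Gridtracer | syngrid/data_processor/processing/building_processor.py | _expand_to_clusters
-- ===== SOURCE A (Python) =====
-- from typing import Dict, List, Optional, Union
--
-- def _expand_to_clusters(neighbors_dict: Dict[int, List[int]]) -> Dict[int, set]:
--     """
--     Expand direct neighbors to full clusters using graph traversal.
--     Each building should know about all buildings in its connected component.
--
--     Parameters:
--     -----------
--     neighbors_dict : dict
--         Mapping of building index to list of direct neighbor indices
--
--     Returns:
--     --------
--     dict : Mapping of building index to set of all connected building indices
--     """
--     clusters_dict = {}
--     visited = set()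
--
--     def dfs_cluster(start_idx: int, current_cluster: set):
--         """Depth-first search to find all connected buildings"""
--         if start_idx in visited:
--             return
--
--         visited.add(start_idx)
--         current_cluster.add(start_idx)
--
--         # Recursively visit all neighbors
--         for neighbor_idx in neighbors_dict.get(start_idx, []):
--             if neighbor_idx not in visited:
--                 dfs_cluster(neighbor_idx, current_cluster)
--
--     # Find all clusters
--     for building_idx in neighbors_dict:
--         if building_idx not in visited:
--             current_cluster = set()
--             dfs_cluster(building_idx, current_cluster)
--
--             # Assign this cluster to all buildings in it
--             for idx in current_cluster:
--                 clusters_dict[idx] = current_cluster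
--
--     return clusters_dict
-- ===== SOURCE B (Python) =====
-- def _expand_to_clusters(neighbors_dict):
--     """Two-phase re-implementation.
--
--     Phase 1: an iterative explicit-stack traversal (pushing each node's
--     neighbors reversed preserves the recursive DFS visit order) collects
--     every cluster as an ordered visit list.
--     Phase 2: the result dict is built afterwards from the cluster lists.
--     """
--     visited = set()
--     clusters = []
--     for building_idx in neighbors_dict:
--         if building_idx not in visited:
--             order = []
--             stack = [building_idx]
--             while stack:
--                 node = stack.pop()
--                 if node not in visited:
--                     visited.add(node)
--                     order.append(node)
--                     stack.extend(reversed(neighbors_dict.get(node, [])))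
--             clusters.append(order)
--
--     clusters_dict = {}
--     for order in clusters:
--         cluster_set = set(order)
--         for idx in order:
--             clusters_dict[idx] = cluster_set
--     return clusters_dict
-- ===== Notes on version B (the rewrite author's own statement) =====
-- stated objective: alternative
-- what changed: A's fused loop with a recursive dfs_cluster is replaced by a two-phase design: an explicit-stack iterative traversal first collects each cluster as an ordered visit list (neighbors pushed reversed to preserve the DFS order), and the result dict is then built in a separate second pass over the collected cluster lists.
import Mathlib
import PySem

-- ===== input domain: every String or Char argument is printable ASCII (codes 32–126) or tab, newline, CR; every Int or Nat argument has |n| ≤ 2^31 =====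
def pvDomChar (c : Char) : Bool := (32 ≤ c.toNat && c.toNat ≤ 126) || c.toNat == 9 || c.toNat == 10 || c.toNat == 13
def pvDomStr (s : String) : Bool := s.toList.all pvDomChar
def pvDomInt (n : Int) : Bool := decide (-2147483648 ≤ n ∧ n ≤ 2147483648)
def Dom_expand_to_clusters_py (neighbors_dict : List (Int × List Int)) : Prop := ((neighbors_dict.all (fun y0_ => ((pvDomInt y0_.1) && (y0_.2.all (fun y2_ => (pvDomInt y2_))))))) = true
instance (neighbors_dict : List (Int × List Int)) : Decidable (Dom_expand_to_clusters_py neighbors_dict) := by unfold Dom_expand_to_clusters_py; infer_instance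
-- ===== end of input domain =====

-- B replaces A's fused loop + recursive dfs_cluster by a two-phase design: phase 1
-- collects each cluster as an ordered visit list with an explicit-stack traversal
-- (neighbors pushed reversed, preserving the DFS visit order); phase 2 builds the
-- result dict from the collected cluster lists. Objective: alternative decomposition.
-- Both traversal ports carry a fuel counter, decremented only when a fresh node is
-- marked visited, purely as a totality guard: fuel = #keys + total neighbor entries
-- + 1 exceeds the number of distinct nodes, and each decrement marks a distinct new
-- node, so the fuel-0 arms are never reached on an actual run.

-- ===== PORT A =====
-- fuel bound (totality guard, same expression in both ports)
def pvFuel (neighbors_dict : List (Int × List Int)) : Nat :=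
  neighbors_dict.foldl (fun a p => a + p.2.length) neighbors_dict.length + 1

-- A's recursive dfs_cluster: structural recursion over the pending neighbor list,
-- descending into each unvisited neighbor's own neighbor list (the Python
-- recursion); the 'min' clamp and the fuel-0 arm are totality guards only.
def pvDfsL (d : PySem.Dict Int (List Int)) : Nat → List Int → PySem.Set Int → PySem.Set Int → Nat × PySem.Set Int × PySem.Set Int
  | f, [], v, c => (f, v, c)
  | f, n :: t, v, c =>
    if n ∈ v then pvDfsL d f t v c
    else match f with
      | 0 => pvDfsL d 0 t v c
      | g+1 =>
        let r := pvDfsL d g (d.getD n []) (PySem.Set.add v n) (PySem.Set.add c n)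
        pvDfsL d (min r.1 (g+1)) t r.2.1 r.2.2
  termination_by f ns => (f, ns.length)
  decreasing_by
  · exact Prod.Lex.right _ (Nat.lt_succ_self _)
  · exact Prod.Lex.right _ (Nat.lt_succ_self _)
  · exact Prod.Lex.left _ _ (Nat.lt_succ_self _)
  · rcases Nat.lt_or_eq_of_le (Nat.min_le_right _ (g+1)) with h'|h'
    · exact Prod.Lex.left _ _ h'
    · rw [h']; exact Prod.Lex.right _ (Nat.lt_succ_self _)

def expand_to_clusters_py (neighbors_dict : List (Int × List Int)) : List (Int × List Int) :=
  let d := PySem.Dict.ofList neighbors_dict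
  let res := (PySem.Dict.keys d).foldl
    (fun (st : PySem.Dict Int (List Int) × PySem.Set Int × Nat) k =>
      if k ∈ st.2.1 then st
      else
        let r := pvDfsL d st.2.2 [k] st.2.1 PySem.Set.empty
        (r.2.2.foldl (fun cd idx => cd.insert idx r.2.2) st.1, r.2.1, r.1))
    (PySem.Dict.empty, PySem.Set.empty, pvFuel neighbors_dict)
  res.1.items

-- ===== PORT B =====
-- B's while loop: explicit stack (list head = top); an unvisited popped node is
-- marked visited, appended to the ordered visit list 'ord', and its neighbor list
-- is pushed reversed (stack.extend(reversed(...)) = prepend in original order).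
def pvWalk (d : PySem.Dict Int (List Int)) : Nat → List Int → PySem.Set Int → List Int → Nat × PySem.Set Int × List Int
  | f, [], v, ord => (f, v, ord)
  | f, n :: rest, v, ord =>
    if n ∈ v then pvWalk d f rest v ord
    else match f with
      | 0 => (0, v, ord)
      | g+1 => pvWalk d g (d.getD n [] ++ rest) (PySem.Set.add v n) (ord ++ [n])
  termination_by f st => (f, st.length)
  decreasing_by
  · exact Prod.Lex.right _ (Nat.lt_succ_self _)
  · exact Prod.Lex.left _ _ (Nat.lt_succ_self _)

-- Phase 1: collect the clusters as ordered visit lists; phase 2: build the dict.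
def expand_to_clusters_py_alt (neighbors_dict : List (Int × List Int)) : List (Int × List Int) :=
  let d := PySem.Dict.ofList neighbors_dict
  let st := (PySem.Dict.keys d).foldl
    (fun (st : PySem.Set Int × Nat × List (List Int)) k =>
      if k ∈ st.1 then st
      else
        let r := pvWalk d st.2.1 [k] st.1 []
        (r.2.1, r.1, st.2.2 ++ [r.2.2]))
    (PySem.Set.empty, pvFuel neighbors_dict, [])
  (st.2.2.foldl
    (fun cd ord =>
      let s := PySem.Set.ofList ord
      ord.foldl (fun cd idx => cd.insert idx s) cd)
    PySem.Dict.empty).items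

-- ===== PRECONDITION & SPEC =====
def Spec_expand_to_clusters_py (neighbors_dict : List (Int × List Int)) (out : List (Int × List Int)) : Prop := out = expand_to_clusters_py_alt neighbors_dict
instance (neighbors_dict : List (Int × List Int)) (out : List (Int × List Int)) : Decidable (Spec_expand_to_clusters_py neighbors_dict out) := by unfold Spec_expand_to_clusters_py; infer_instance

-- ===== CLAIM (what is proved, stated in full; the proofs are below) =====
def Claim_equal_expand_to_clusters_py : Prop := ∀ (neighbors_dict : List (Int × List Int)), Dom_expand_to_clusters_py neighbors_dict → Spec_expand_to_clusters_py neighbors_dict (expand_to_clusters_py neighbors_dict)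

-- ===== LEMMAS AND PROOFS =====

theorem pvDfsL_nil (d : PySem.Dict Int (List Int)) (f : Nat) (v c : PySem.Set Int) :
    pvDfsL d f [] v c = (f, v, c) := by rw [pvDfsL]

theorem pvDfsL_cons (d : PySem.Dict Int (List Int)) (f : Nat) (n : Int) (t : List Int) (v c : PySem.Set Int) :
    pvDfsL d f (n :: t) v c =
      if n ∈ v then pvDfsL d f t v c
      else match f with
        | 0 => pvDfsL d 0 t v c
        | g+1 =>
          let r := pvDfsL d g (d.getD n []) (PySem.Set.add v n) (PySem.Set.add c n)
          pvDfsL d (min r.1 (g+1)) t r.2.1 r.2.2 := by conv_lhs => rw [pvDfsL.eq_def]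

theorem pvDfsL_zero (d : PySem.Dict Int (List Int)) (ns : List Int) (v c : PySem.Set Int) :
    pvDfsL d 0 ns v c = (0, v, c) := by
  induction ns with
  | nil => rw [pvDfsL_nil]
  | cons n t ih => rw [pvDfsL_cons]; split <;> exact ih

theorem pvDfsL_fuel_le (d : PySem.Dict Int (List Int)) (f : Nat) (ns : List Int) (v c : PySem.Set Int) :
    (pvDfsL d f ns v c).1 ≤ f := by
  induction f using Nat.strong_induction_on generalizing ns v c with
  | _ f IH =>
    induction ns generalizing v c with
    | nil => rw [pvDfsL_nil]
    | cons n t ih =>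
      rw [pvDfsL_cons]
      split
      · exact ih v c
      · match f with
        | 0 => simp [pvDfsL_zero]
        | g+1 =>
          have hr : (pvDfsL d g (d.getD n []) (PySem.Set.add v n) (PySem.Set.add c n)).1 ≤ g :=
            IH g (Nat.lt_succ_self g) _ _ _
          have hmin : min (pvDfsL d g (d.getD n []) (PySem.Set.add v n) (PySem.Set.add c n)).1 (g+1) ≤ g :=
            le_trans (Nat.min_le_left _ _) hr
          have h := IH _ (Nat.lt_succ_of_le hmin) t
            (pvDfsL d g (d.getD n []) (PySem.Set.add v n) (PySem.Set.add c n)).2.1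
            (pvDfsL d g (d.getD n []) (PySem.Set.add v n) (PySem.Set.add c n)).2.2
          exact le_trans h (le_trans hmin (Nat.le_succ g))

-- visited grows, cluster stays inside visited, cluster stays Nodup
theorem pvDfsL_inv (d : PySem.Dict Int (List Int)) (f : Nat) (ns : List Int) (v c : PySem.Set Int)
    (hcv : ∀ x ∈ c, x ∈ v) (hnd : c.Nodup) :
    (∀ x ∈ v, x ∈ (pvDfsL d f ns v c).2.1) ∧
    (∀ x ∈ (pvDfsL d f ns v c).2.2, x ∈ (pvDfsL d f ns v c).2.1) ∧
    (pvDfsL d f ns v c).2.2.Nodup := by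
  induction f using Nat.strong_induction_on generalizing ns v c with
  | _ f IH =>
    induction ns generalizing v c with
    | nil => rw [pvDfsL_nil]; exact ⟨fun x h => h, hcv, hnd⟩
    | cons n t ih =>
      rw [pvDfsL_cons]
      split
      · exact ih v c hcv hnd
      · next hnv =>
        match f with
        | 0 => rw [pvDfsL_zero]; exact ⟨fun x h => h, hcv, hnd⟩
        | g+1 =>
          have hcv' : ∀ x ∈ PySem.Set.add c n, x ∈ PySem.Set.add v n := by
            intro x hx
            rcases (PySem.Set.mem_add c n x).1 hx with h | h
            · exact (PySem.Set.mem_add v n x).2 (Or.inl (hcv x h))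
            · exact (PySem.Set.mem_add v n x).2 (Or.inr h)
          have hnd' : (PySem.Set.add c n).Nodup := PySem.Set.nodup_add c n hnd
          have h1 := IH g (Nat.lt_succ_self g) (d.getD n []) _ _ hcv' hnd'
          set r := pvDfsL d g (d.getD n []) (PySem.Set.add v n) (PySem.Set.add c n) with hr
          have hle : min r.1 (g+1) < g + 1 :=
            Nat.lt_succ_of_le (le_trans (Nat.min_le_left _ _) (pvDfsL_fuel_le d g _ _ _))
          have h2 := IH (min r.1 (g+1)) hle t r.2.1 r.2.2 h1.2.1 h1.2.2
          refine ⟨fun x hx => h2.1 x (h1.1 x ((PySem.Set.mem_add v n x).2 (Or.inl hx))), h2.2.1, h2.2.2⟩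

theorem pvDfsL_append (d : PySem.Dict Int (List Int)) (xs ys : List Int) (f : Nat) (v c : PySem.Set Int) :
    pvDfsL d f (xs ++ ys) v c =
      (fun r : Nat × PySem.Set Int × PySem.Set Int => pvDfsL d r.1 ys r.2.1 r.2.2) (pvDfsL d f xs v c) := by
  induction xs generalizing f v c with
  | nil => rw [List.nil_append, pvDfsL_nil]
  | cons n t ih =>
    rw [List.cons_append, pvDfsL_cons, pvDfsL_cons]
    split
    · exact ih f v c
    · match f with
      | 0 => exact ih 0 v c
      | g+1 => exact ih _ _ _

theorem pvWalk_nil (d : PySem.Dict Int (List Int)) (f : Nat) (v : PySem.Set Int) (ord : List Int) :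
    pvWalk d f [] v ord = (f, v, ord) := by rw [pvWalk]

theorem pvWalk_cons (d : PySem.Dict Int (List Int)) (f : Nat) (n : Int) (rest : List Int) (v : PySem.Set Int) (ord : List Int) :
    pvWalk d f (n :: rest) v ord =
      if n ∈ v then pvWalk d f rest v ord
      else match f with
        | 0 => (0, v, ord)
        | g+1 => pvWalk d g (d.getD n [] ++ rest) (PySem.Set.add v n) (ord ++ [n]) := by
  conv_lhs => rw [pvWalk.eq_def]

theorem pvWalk_zero (d : PySem.Dict Int (List Int)) (st : List Int) (v : PySem.Set Int) (ord : List Int) :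
    pvWalk d 0 st v ord = (0, v, ord) := by
  induction st with
  | nil => rw [pvWalk_nil]
  | cons n t ih =>
    rw [pvWalk_cons]
    split
    · exact ih
    · rfl

-- the stack walk simulates A's recursive DFS step for step (same fuel, same
-- visited set; the ordered visit list coincides with A's cluster set as a list)
theorem pvWalk_main (d : PySem.Dict Int (List Int)) (f : Nat) (ns rest : List Int) (v c : PySem.Set Int)
    (hcv : ∀ x ∈ c, x ∈ v) (hnd : c.Nodup) :
    pvWalk d f (ns ++ rest) v c =
      (fun r : Nat × PySem.Set Int × PySem.Set Int => pvWalk d r.1 rest r.2.1 r.2.2) (pvDfsL d f ns v c) := by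
  induction f using Nat.strong_induction_on generalizing ns rest v c with
  | _ f IH =>
    induction ns generalizing rest v c with
    | nil => rw [List.nil_append, pvDfsL_nil]
    | cons n t ih =>
      rw [List.cons_append, pvWalk_cons, pvDfsL_cons]
      split
      · exact ih rest v c hcv hnd
      · next hnv =>
        match f with
        | 0 => simp [pvDfsL_zero, pvWalk_zero]
        | g+1 =>
          have hnc : n ∉ c := fun h => hnv (hcv n h)
          have hcv' : ∀ x ∈ PySem.Set.add c n, x ∈ PySem.Set.add v n := by
            intro x hx
            rcases (PySem.Set.mem_add c n x).1 hx with h | h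
            · exact (PySem.Set.mem_add v n x).2 (Or.inl (hcv x h))
            · exact (PySem.Set.mem_add v n x).2 (Or.inr h)
          have hnd' : (PySem.Set.add c n).Nodup := PySem.Set.nodup_add c n hnd
          show pvWalk d g (d.getD n [] ++ (t ++ rest)) (PySem.Set.add v n) (c ++ [n]) =
            (fun r : Nat × PySem.Set Int × PySem.Set Int => pvWalk d r.1 rest r.2.1 r.2.2)
              (pvDfsL d (min (pvDfsL d g (d.getD n []) (PySem.Set.add v n) (PySem.Set.add c n)).1 (g+1)) t
                (pvDfsL d g (d.getD n []) (PySem.Set.add v n) (PySem.Set.add c n)).2.1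
                (pvDfsL d g (d.getD n []) (PySem.Set.add v n) (PySem.Set.add c n)).2.2)
          have hca : c ++ [n] = PySem.Set.add c n := (PySem.Set.add_of_not_mem hnc).symm
          have hle := pvDfsL_fuel_le d g (d.getD n []) (PySem.Set.add v n) (PySem.Set.add c n)
          rw [hca, ← List.append_assoc, IH g (Nat.lt_succ_self g) (d.getD n [] ++ t) rest _ _ hcv' hnd']
          simp only
          rw [pvDfsL_append]
          simp only
          rw [Nat.min_eq_left (le_trans hle (Nat.le_succ g))]

theorem pvWalk_eq_pvDfsL (d : PySem.Dict Int (List Int)) (f : Nat) (k : Int) (v : PySem.Set Int) :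
    pvWalk d f [k] v [] = pvDfsL d f [k] v PySem.Set.empty := by
  have h := pvWalk_main d f [k] [] v PySem.Set.empty (by intro x hx; cases hx) List.nodup_nil
  rw [List.append_nil] at h
  exact h.trans (pvWalk_nil d _ _ _)

-- B's phase-1 fold only appends to its cluster-list accumulator
theorem pvBfold_acc (d : PySem.Dict Int (List Int)) (ks : List Int) (v : PySem.Set Int) (f : Nat) (cls : List (List Int)) :
    ks.foldl
      (fun (st : PySem.Set Int × Nat × List (List Int)) k =>
        if k ∈ st.1 then st
        else
          ((pvWalk d st.2.1 [k] st.1 []).2.1, (pvWalk d st.2.1 [k] st.1 []).1,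
           st.2.2 ++ [(pvWalk d st.2.1 [k] st.1 []).2.2])) (v, f, cls) =
      ((ks.foldl
        (fun (st : PySem.Set Int × Nat × List (List Int)) k =>
          if k ∈ st.1 then st
          else
            ((pvWalk d st.2.1 [k] st.1 []).2.1, (pvWalk d st.2.1 [k] st.1 []).1,
             st.2.2 ++ [(pvWalk d st.2.1 [k] st.1 []).2.2])) (v, f, [])).1,
       (ks.foldl
        (fun (st : PySem.Set Int × Nat × List (List Int)) k =>
          if k ∈ st.1 then st
          else
            ((pvWalk d st.2.1 [k] st.1 []).2.1, (pvWalk d st.2.1 [k] st.1 []).1,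
             st.2.2 ++ [(pvWalk d st.2.1 [k] st.1 []).2.2])) (v, f, [])).2.1,
       cls ++ (ks.foldl
        (fun (st : PySem.Set Int × Nat × List (List Int)) k =>
          if k ∈ st.1 then st
          else
            ((pvWalk d st.2.1 [k] st.1 []).2.1, (pvWalk d st.2.1 [k] st.1 []).1,
             st.2.2 ++ [(pvWalk d st.2.1 [k] st.1 []).2.2])) (v, f, [])).2.2) := by
  induction ks generalizing v f cls with
  | nil => simp
  | cons k ks ih =>
    simp only [List.foldl_cons]
    by_cases hk : k ∈ v
    · simp only [if_pos hk]
      exact ih v f cls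
    · simp only [if_neg hk, List.nil_append]
      rw [ih _ _ (cls ++ _), ih _ _ ([_])]
      simp

-- the two outer folds agree: A's dict equals B's dict built from B's cluster lists
theorem pvOuter (d : PySem.Dict Int (List Int)) (ks : List Int) (cd : PySem.Dict Int (PySem.Set Int)) (v : PySem.Set Int) (f : Nat) :
    ks.foldl
      (fun (st : PySem.Dict Int (List Int) × PySem.Set Int × Nat) k =>
        if k ∈ st.2.1 then st
        else
          ((pvDfsL d st.2.2 [k] st.2.1 PySem.Set.empty).2.2.foldl
             (fun cd idx => cd.insert idx (pvDfsL d st.2.2 [k] st.2.1 PySem.Set.empty).2.2) st.1,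
           (pvDfsL d st.2.2 [k] st.2.1 PySem.Set.empty).2.1, (pvDfsL d st.2.2 [k] st.2.1 PySem.Set.empty).1)) (cd, v, f) =
      ((ks.foldl
        (fun (st : PySem.Set Int × Nat × List (List Int)) k =>
          if k ∈ st.1 then st
          else
            ((pvWalk d st.2.1 [k] st.1 []).2.1, (pvWalk d st.2.1 [k] st.1 []).1,
             st.2.2 ++ [(pvWalk d st.2.1 [k] st.1 []).2.2])) (v, f, [])).2.2.foldl
        (fun cd ord => ord.foldl (fun cd idx => cd.insert idx (PySem.Set.ofList ord)) cd) cd,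
       (ks.foldl
        (fun (st : PySem.Set Int × Nat × List (List Int)) k =>
          if k ∈ st.1 then st
          else
            ((pvWalk d st.2.1 [k] st.1 []).2.1, (pvWalk d st.2.1 [k] st.1 []).1,
             st.2.2 ++ [(pvWalk d st.2.1 [k] st.1 []).2.2])) (v, f, [])).1,
       (ks.foldl
        (fun (st : PySem.Set Int × Nat × List (List Int)) k =>
          if k ∈ st.1 then st
          else
            ((pvWalk d st.2.1 [k] st.1 []).2.1, (pvWalk d st.2.1 [k] st.1 []).1,
             st.2.2 ++ [(pvWalk d st.2.1 [k] st.1 []).2.2])) (v, f, [])).2.1) := by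
  induction ks generalizing cd v f with
  | nil => simp
  | cons k ks ih =>
    simp only [List.foldl_cons]
    by_cases hk : k ∈ v
    · simp only [if_pos hk]
      exact ih cd v f
    · simp only [if_neg hk, List.nil_append]
      rw [pvWalk_eq_pvDfsL]
      have hinv := pvDfsL_inv d f [k] v PySem.Set.empty (by intro x hx; cases hx) List.nodup_nil
      rw [ih _ (pvDfsL d f [k] v PySem.Set.empty).2.1 (pvDfsL d f [k] v PySem.Set.empty).1,
        pvBfold_acc d ks (pvDfsL d f [k] v PySem.Set.empty).2.1 (pvDfsL d f [k] v PySem.Set.empty).1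
          [(pvDfsL d f [k] v PySem.Set.empty).2.2]]
      simp only [List.singleton_append, List.foldl_cons]
      rw [PySem.Set.ofList_eq_self_of_nodup _ hinv.2.2]

-- ===== VERDICT (by name: the statement is the Claim_ definition above) =====
theorem expand_to_clusters_py_spec : Claim_equal_expand_to_clusters_py := by
  intro nd _
  unfold Spec_expand_to_clusters_py expand_to_clusters_py expand_to_clusters_py_alt
  exact congrArg PySem.Dict.items (congrArg Prod.fst
    (pvOuter (PySem.Dict.ofList nd) (PySem.Dict.ofList nd).keys PySem.Dict.empty
      PySem.Set.empty (pvFuel nd)))
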